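-- pv_equiv track=rewrite | github.com/DaviACCDi/reasoning | jobs/subtypes/orchestrate_text_substitution_subtypes.py | infer_caesar_shift
-- ===== SOURCE A (Python) =====
-- def infer_caesar_shift(pairs: list[tuple[str, str]]) -> int | None:
--     shifts: set[int] = set()
--     for ciph, plain in pairs:
--         if len(ciph) != len(plain):
--             return None
--         for i in range(len(ciph)):
--             cc, pc = ciph[i], plain[i]
--             if cc == " ":
--                 if pc != " ":
--                     return None
--                 continue
--             if not (cc.islower() and pc.islower()):
--                 return None
--             shifts.add((ord(cc) - ord(pc)) % 26)
--     if len(shifts) != 1: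
--         return None
--     return shifts.pop()
-- ===== SOURCE B (Python) =====
-- def _shift_char(c, s):
--     return c if c == " " else chr((ord(c) - 97 + s) % 26 + 97)
--
--
-- def infer_caesar_shift(pairs: list[tuple[str, str]]) -> int | None:
--     # stage 1: validate shape (equal lengths, aligned spaces, lowercase letters)
--     for ciph, plain in pairs:
--         if len(ciph) != len(plain):
--             return None
--         for cc, pc in zip(ciph, plain):
--             if cc == " " or pc == " ":
--                 if cc != pc:
--                     return None
--             elif not (cc.islower() and pc.islower()):
--                 return None
--     # stage 2: take the shift suggested by the first letter position and verify
--     # it by re-encrypting every plaintext and comparing with the ciphertext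
--     for ciph0, plain0 in pairs:
--         for cc, pc in zip(ciph0, plain0):
--             if cc != " ":
--                 s = (ord(cc) - ord(pc)) % 26
--                 if all("".join(_shift_char(c, s) for c in plain) == ciph
--                        for ciph, plain in pairs):
--                     return s
--                 return None
--     return None
-- ===== Notes on version B (the rewrite author's own statement) =====
-- stated objective: alternative
-- what changed: B splits A's single collect-shifts-into-a-set pass into two stages: a pure shape-validation pass, then a guess-and-verify step that takes the shift suggested by the first letter position and confirms it by re-encrypting every plaintext with that shift and comparing the result with the ciphertext, instead of accumulating all per-letter shifts in a set and testing its size.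
import Mathlib
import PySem

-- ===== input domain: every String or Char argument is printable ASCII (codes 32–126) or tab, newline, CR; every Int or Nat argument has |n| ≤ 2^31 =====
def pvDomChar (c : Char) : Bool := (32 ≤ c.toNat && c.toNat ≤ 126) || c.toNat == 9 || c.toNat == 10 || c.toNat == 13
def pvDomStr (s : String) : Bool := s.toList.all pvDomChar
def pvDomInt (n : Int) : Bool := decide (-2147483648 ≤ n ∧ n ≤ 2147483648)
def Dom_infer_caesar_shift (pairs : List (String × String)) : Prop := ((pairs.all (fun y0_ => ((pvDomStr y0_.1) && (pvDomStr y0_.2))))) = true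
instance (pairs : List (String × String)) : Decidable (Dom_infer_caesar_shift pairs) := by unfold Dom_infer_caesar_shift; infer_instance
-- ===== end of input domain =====

-- B replaces A's single collect-all-shifts-into-a-set pass by two staged passes:
-- validate the shape, then take the shift suggested by the FIRST letter position and
-- verify it by RE-ENCRYPTING every plaintext and comparing with the ciphertext
-- (objective: alternative; no speed claim).

-- ===== PORT A =====

-- cc.islower() for a ONE-CHARACTER string: exact on printable ASCII (Dom), where the
-- only cased characters are 'a'..'z' and 'A'..'Z'.
def pvIsLower (c : Char) : Bool := 'a' ≤ c && c ≤ 'z'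

-- inner 'for i in range(len(ciph))' of A, reading ciph[i], plain[i]; called only after
-- the equal-length check, so simultaneous recursion over the two char lists reads the
-- same characters.
def pvInnerA (shifts : PySem.Set Int) : List Char → List Char → Option (PySem.Set Int)
  | [], _ => some shifts
  | _ :: _, [] => some shifts          -- unreachable: lengths are equal when called
  | cc :: cs, pc :: ps =>
    if cc = ' ' then
      if pc ≠ ' ' then none
      else pvInnerA shifts cs ps
    else if ¬ (pvIsLower cc ∧ pvIsLower pc) then none
    else pvInnerA (PySem.Set.add shifts (PySem.Int.mod ((cc.toNat : Int) - (pc.toNat : Int)) 26)) cs ps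

-- outer 'for ciph, plain in pairs' of A
def pvLoopA (shifts : PySem.Set Int) : List (String × String) → Option (PySem.Set Int)
  | [] => some shifts
  | (ciph, plain) :: rest =>
    if PySem.Str.len ciph ≠ PySem.Str.len plain then none
    else
      match pvInnerA shifts ciph.toList plain.toList with
      | none => none
      | some shifts' => pvLoopA shifts' rest

def infer_caesar_shift (pairs : List (String × String)) : Option Int :=
  match pvLoopA PySem.Set.empty pairs with
  | none => none
  | some shifts =>
    if PySem.Set.len shifts ≠ 1 then none
    else shifts.head?                  -- shifts.pop() on the singleton set

-- ===== PORT B =====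

-- inner validation loop 'for cc, pc in zip(ciph, plain)' of B's stage 1
def pvInnerV : List Char → List Char → Bool
  | [], _ => true
  | _ :: _, [] => true
  | cc :: cs, pc :: ps =>
    if cc = ' ' ∨ pc = ' ' then
      if cc ≠ pc then false else pvInnerV cs ps
    else if ¬ (pvIsLower cc ∧ pvIsLower pc) then false
    else pvInnerV cs ps

-- stage-1 loop of B: 'return None' on a shape violation becomes 'false'
def pvValidateB : List (String × String) → Bool
  | [] => true
  | (ciph, plain) :: rest =>
    if PySem.Str.len ciph ≠ PySem.Str.len plain then false
    else pvInnerV ciph.toList plain.toList && pvValidateB rest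

-- _shift_char of Source B
def pvShiftChar (s : Int) (c : Char) : Char :=
  if c = ' ' then c
  else Char.ofNat (PySem.Int.mod ((c.toNat : Int) - 97 + s) 26 + 97).toNat

-- 'all("".join(_shift_char(c, s) for c in plain) == ciph for ciph, plain in pairs)'
def pvCheckAll (s : Int) : List (String × String) → Bool
  | [] => true
  | (ciph, plain) :: rest =>
    (plain.toList.map (pvShiftChar s) == ciph.toList) && pvCheckAll s rest

-- inner loop of B's stage 2: the first cc != " " yields a candidate shift
def pvFirstLetterShift : List Char → List Char → Option Int
  | [], _ => none
  | _ :: _, [] => none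
  | cc :: cs, pc :: ps =>
    if cc ≠ ' ' then some (PySem.Int.mod ((cc.toNat : Int) - (pc.toNat : Int)) 26)
    else pvFirstLetterShift cs ps

-- stage-2 loop of B: find the first letter position, verify its shift on all pairs
def pvSearch (full : List (String × String)) : List (String × String) → Option Int
  | [] => none
  | (ciph, plain) :: rest =>
    match pvFirstLetterShift ciph.toList plain.toList with
    | some s => if pvCheckAll s full then some s else none
    | none => pvSearch full rest

def infer_caesar_shift_alt (pairs : List (String × String)) : Option Int :=
  if pvValidateB pairs then pvSearch pairs pairs else none

-- ===== PRECONDITION & SPEC =====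
def Spec_infer_caesar_shift (pairs : List (String × String)) (out : Option Int) : Prop := out = infer_caesar_shift_alt pairs
instance (pairs : List (String × String)) (out : Option Int) : Decidable (Spec_infer_caesar_shift pairs out) := by unfold Spec_infer_caesar_shift; infer_instance

-- ===== CLAIM =====
def Claim_equal_infer_caesar_shift : Prop := ∀ (pairs : List (String × String)), Dom_infer_caesar_shift pairs → Spec_infer_caesar_shift pairs (infer_caesar_shift pairs)

-- ===== LEMMAS AND PROOFS =====

-- the list of per-letter shifts of one (validated) pair, in reading order
def pvShiftsC : List Char → List Char → List Int
  | [], _ => []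
  | _ :: _, [] => []
  | cc :: cs, pc :: ps =>
    if cc = ' ' then pvShiftsC cs ps
    else PySem.Int.mod ((cc.toNat : Int) - (pc.toNat : Int)) 26 :: pvShiftsC cs ps

def pvShiftsAll : List (String × String) → List Int
  | [] => []
  | (ciph, plain) :: rest => pvShiftsC ciph.toList plain.toList ++ pvShiftsAll rest

-- A's inner loop = shape check + shift accumulation
theorem pvInnerA_char : ∀ (cs ps : List Char) (shifts : PySem.Set Int),
    pvInnerA shifts cs ps =
      if pvInnerV cs ps then some ((pvShiftsC cs ps).foldl PySem.Set.add shifts) else none := by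
  intro cs
  induction cs with
  | nil => intro ps shifts; simp [pvInnerA, pvInnerV, pvShiftsC]
  | cons cc cs ih =>
    intro ps shifts
    cases ps with
    | nil => simp [pvInnerA, pvInnerV, pvShiftsC]
    | cons pc ps =>
      by_cases hcc : cc = ' '
      · by_cases hpc : pc = ' '
        · simp only [pvInnerA, pvInnerV, pvShiftsC, hcc, hpc]
          simp [ih]
        · simp [pvInnerA, pvInnerV, hcc, hpc, Ne.symm hpc]
      · by_cases hpc : pc = ' '
        · subst hpc
          have hA : pvInnerA shifts (cc :: cs) (' ' :: ps) = none := by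
            simp [pvInnerA, hcc, show pvIsLower ' ' = false from rfl]
          have hV : pvInnerV (cc :: cs) (' ' :: ps) = false := by
            simp [pvInnerV, hcc]
          rw [hA, hV]; simp
        · by_cases hlow : pvIsLower cc ∧ pvIsLower pc
          · simp only [pvInnerA, pvInnerV, pvShiftsC, hcc, hpc, hlow]
            simp [ih]
          · simp [pvInnerA, pvInnerV, hcc, hpc, hlow]


-- A's outer loop = shape check + shift accumulation
theorem pvLoopA_char : ∀ (pairs : List (String × String)) (shifts : PySem.Set Int),
    pvLoopA shifts pairs =
      if pvValidateB pairs then some ((pvShiftsAll pairs).foldl PySem.Set.add shifts) else none := by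
  intro pairs
  induction pairs with
  | nil => intro shifts; simp [pvLoopA, pvValidateB, pvShiftsAll]
  | cons p rest ih =>
    intro shifts
    obtain ⟨ciph, plain⟩ := p
    by_cases hlen : PySem.Str.len ciph ≠ PySem.Str.len plain
    · simp only [pvLoopA, pvValidateB, if_pos hlen, Bool.false_eq_true, if_false]
    · simp only [pvLoopA, pvValidateB, if_neg hlen, pvInnerA_char]
      by_cases hv : pvInnerV ciph.toList plain.toList = true
      · simp [hv, ih, pvShiftsAll, List.foldl_append]
      · simp [hv]


theorem pvFirstLetterShift_char : ∀ (cs ps : List Char),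
    pvFirstLetterShift cs ps = (pvShiftsC cs ps).head? := by
  intro cs
  induction cs with
  | nil => intro ps; simp [pvFirstLetterShift, pvShiftsC]
  | cons cc cs ih =>
    intro ps
    cases ps with
    | nil => simp [pvFirstLetterShift, pvShiftsC]
    | cons pc ps =>
      by_cases hcc : cc = ' '
      · simp [pvFirstLetterShift, pvShiftsC, hcc, ih]
      · simp [pvFirstLetterShift, pvShiftsC, hcc]


theorem pvSearch_char : ∀ (pairs full : List (String × String)),
    pvSearch full pairs =
      match (pvShiftsAll pairs).head? with
      | none => none
      | some s => if pvCheckAll s full then some s else none := by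
  intro pairs
  induction pairs with
  | nil => intro full; simp [pvSearch, pvShiftsAll]
  | cons p rest ih =>
    intro full
    obtain ⟨ciph, plain⟩ := p
    simp only [pvSearch, pvShiftsAll, pvFirstLetterShift_char]
    cases hC : pvShiftsC ciph.toList plain.toList with
    | nil => simpa using ih full
    | cons s0 t => simp


theorem pvShiftsC_bounds : ∀ (cs ps : List Char) (x : Int),
    x ∈ pvShiftsC cs ps → 0 ≤ x ∧ x < 26 := by
  intro cs
  induction cs with
  | nil => intro ps x hx; simp [pvShiftsC] at hx
  | cons cc cs ih =>
    intro ps x hx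
    cases ps with
    | nil => simp [pvShiftsC] at hx
    | cons pc ps =>
      by_cases hcc : cc = ' '
      · exact ih ps x (by simpa [pvShiftsC, hcc] using hx)
      · simp only [pvShiftsC, if_neg hcc, List.mem_cons] at hx
        rcases hx with h | h
        · subst h
          rw [PySem.Int.mod_eq_emod_of_pos (by norm_num)]
          constructor
          · exact Int.emod_nonneg _ (by norm_num)
          · exact Int.emod_lt_of_pos _ (by norm_num)
        · exact ih ps x h


theorem pvShiftsAll_bounds : ∀ (pairs : List (String × String)) (x : Int),
    x ∈ pvShiftsAll pairs → 0 ≤ x ∧ x < 26 := by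
  intro pairs
  induction pairs with
  | nil => intro x hx; simp [pvShiftsAll] at hx
  | cons p rest ih =>
    intro x hx
    obtain ⟨ciph, plain⟩ := p
    simp only [pvShiftsAll, List.mem_append] at hx
    rcases hx with h | h
    · exact pvShiftsC_bounds _ _ x h
    · exact ih x h


-- the per-character re-encryption test
theorem pvShiftChar_eq_iff (s : Int) (cc pc : Char)
    (hc : pvIsLower cc = true) (hp : pvIsLower pc = true) (hs : 0 ≤ s ∧ s < 26) :
    (pvShiftChar s pc = cc) ↔ PySem.Int.mod ((cc.toNat : Int) - (pc.toNat : Int)) 26 = s := by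
  have hcl : 97 ≤ cc.toNat ∧ cc.toNat ≤ 122 := by
    simp only [pvIsLower, Bool.and_eq_true, decide_eq_true_eq] at hc
    exact ⟨hc.1, hc.2⟩
  have hpl : 97 ≤ pc.toNat ∧ pc.toNat ≤ 122 := by
    simp only [pvIsLower, Bool.and_eq_true, decide_eq_true_eq] at hp
    exact ⟨hp.1, hp.2⟩
  have hpc : pc ≠ ' ' := by
    intro h; rw [h] at hpl; simp at hpl
  rw [pvShiftChar, if_neg hpc,
    PySem.Int.mod_eq_emod_of_pos (a := (pc.toNat : Int) - 97 + s) (by norm_num),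
    PySem.Int.mod_eq_emod_of_pos (a := (cc.toNat : Int) - (pc.toNat : Int)) (by norm_num)]
  set m : Int := ((pc.toNat : Int) - 97 + s) % 26 with hm
  have hmb : 0 ≤ m ∧ m < 26 :=
    ⟨Int.emod_nonneg _ (by norm_num), Int.emod_lt_of_pos _ (by norm_num)⟩
  have hN : (m + 97).toNat < 55296 := by omega
  have htn : (Char.ofNat (m + 97).toNat).toNat = (m + 97).toNat := by
    simp [Char.ofNat, Char.toNat, Char.ofNatAux, Nat.isValidChar, hN]
  constructor
  · intro h
    have h2 : (m + 97).toNat = cc.toNat := by rw [← htn, h]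
    have h3 : m = (cc.toNat : Int) - 97 := by omega
    rw [hm] at h3
    omega
  · intro h
    have h3 : m = (cc.toNat : Int) - 97 := by rw [hm]; omega
    have h4 : (m + 97).toNat = cc.toNat := by omega
    have : (Char.ofNat (m + 97).toNat).toNat = cc.toNat := by rw [htn, h4]
    cases hx : Char.ofNat (m + 97).toNat
    cases cc
    rw [hx] at this
    simp only [Char.toNat] at this
    exact Char.ext (UInt32.toNat_inj.mp this)


theorem pvCheck_char : ∀ (cs ps : List Char) (s : Int), cs.length = ps.length →
    pvInnerV cs ps = true → 0 ≤ s ∧ s < 26 →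
    ((ps.map (pvShiftChar s) == cs) = true ↔ ∀ x ∈ pvShiftsC cs ps, x = s) := by
  intro cs
  induction cs with
  | nil =>
    intro ps s hlen _ _
    cases ps with
    | nil => simp [pvShiftsC]
    | cons pc ps => simp at hlen
  | cons cc cs ih =>
    intro ps s hlen hv hs
    cases ps with
    | nil => simp at hlen
    | cons pc ps =>
      have hlen' : cs.length = ps.length := by simpa using hlen
      by_cases hcc : cc = ' '
      · subst hcc
        have hpc : pc = ' ' := by
          by_contra hpc
          have hne : (' ' : Char) ≠ pc := fun h => hpc h.symm
          simp [pvInnerV, hne] at hv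
        subst hpc
        have hv' : pvInnerV cs ps = true := by simpa [pvInnerV] using hv
        simp only [List.map_cons, List.cons_beq_cons,
          show pvShiftChar s ' ' = ' ' from by simp [pvShiftChar],
          show pvShiftsC (' ' :: cs) (' ' :: ps) = pvShiftsC cs ps from by simp [pvShiftsC],
          show ((' ' : Char) == ' ') = true from rfl, Bool.true_and]
        exact ih ps s hlen' hv' hs
      · have hpc : pc ≠ ' ' := by
          intro hpc
          rw [hpc] at hv
          simp [pvInnerV, hcc] at hv
        have hcond : ¬ (cc = ' ' ∨ pc = ' ') := by tauto
        have hlow : pvIsLower cc = true ∧ pvIsLower pc = true := by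
          by_contra hl
          have hl' : ¬ (pvIsLower cc = true ∧ pvIsLower pc = true) := hl
          rw [show pvInnerV (cc :: cs) (pc :: ps) = false from by
            simp only [pvInnerV, if_neg hcond, if_pos hl']] at hv
          simp at hv
        have hv' : pvInnerV cs ps = true := by
          rw [show pvInnerV (cc :: cs) (pc :: ps) = pvInnerV cs ps from by
            simp only [pvInnerV, if_neg hcond, if_neg (not_not_intro hlow)]] at hv
          exact hv
        simp only [List.map_cons, List.cons_beq_cons, pvShiftsC, if_neg hcc,
          Bool.and_eq_true, beq_iff_eq]
        have ihq : (List.map (pvShiftChar s) ps = cs) ↔ ∀ x ∈ pvShiftsC cs ps, x = s := by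
          rw [← ih ps s hlen' hv' hs]; simp
        rw [ihq, pvShiftChar_eq_iff s cc pc hlow.1 hlow.2 hs]
        constructor
        · rintro ⟨h1, h2⟩ x hx
          rcases List.mem_cons.mp hx with h | h
          · rw [h]; exact h1
          · exact h2 x h
        · intro h
          exact ⟨h _ (by simp), fun x hx => h x (by simp [hx])⟩

theorem pvCheckAll_char : ∀ (pairs : List (String × String)) (s : Int),
    pvValidateB pairs = true → 0 ≤ s ∧ s < 26 →
    (pvCheckAll s pairs = true ↔ ∀ x ∈ pvShiftsAll pairs, x = s) := by
  intro pairs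
  induction pairs with
  | nil => intro s _ _; simp [pvCheckAll, pvShiftsAll]
  | cons p rest ih =>
    intro s hv hs
    obtain ⟨ciph, plain⟩ := p
    have hlen : ¬ PySem.Str.len ciph ≠ PySem.Str.len plain := by
      intro h
      rw [pvValidateB, if_pos h] at hv
      simp at hv
    rw [pvValidateB, if_neg hlen, Bool.and_eq_true] at hv
    have hlen' : ciph.toList.length = plain.toList.length := by
      have := not_ne_iff.mp hlen
      simpa [PySem.Str.len_eq] using this
    simp only [pvCheckAll, pvShiftsAll, Bool.and_eq_true]
    rw [ih s hv.2 hs, pvCheck_char ciph.toList plain.toList s hlen' hv.1 hs]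
    constructor
    · rintro ⟨h1, h2⟩ x hx
      rcases List.mem_append.mp hx with h | h
      · exact h1 x h
      · exact h2 x h
    · intro h
      exact ⟨fun x hx => h x (by simp [hx]), fun x hx => h x (by simp [hx])⟩

-- the set built from a run of equal shifts is the singleton
theorem pvFoldl_add_const : ∀ (t : List Int) (c : Int), (∀ x ∈ t, x = c) →
    t.foldl PySem.Set.add [c] = [c] := by
  intro t
  induction t with
  | nil => intro c _; simp
  | cons x t ih =>
    intro c h
    have hx : x = c := h x (by simp)
    have hadd : PySem.Set.add [c] x = [c] := by
      simp [PySem.Set.add, PySem.Set.contains, hx]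
    rw [List.foldl_cons, hadd]
    exact ih c (fun y hy => h y (by simp [hy]))


theorem pvMem_foldl_add : ∀ (t : List Int) (init : PySem.Set Int) (x : Int),
    x ∈ init ∨ x ∈ t → x ∈ t.foldl PySem.Set.add init := by
  intro t
  induction t with
  | nil => intro init x h; simpa using h
  | cons y t ih =>
    intro init x h
    rw [List.foldl_cons]
    apply ih
    rcases h with h | h
    · left; rw [PySem.Set.mem_add]; left; exact h
    · rcases List.mem_cons.mp h with h | h
      · left; rw [PySem.Set.mem_add]; right; exact h
      · right; exact h


-- ===== VERDICT =====
theorem infer_caesar_shift_spec : Claim_equal_infer_caesar_shift := by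
  intro pairs _
  unfold Spec_infer_caesar_shift infer_caesar_shift infer_caesar_shift_alt
  rw [pvLoopA_char, pvSearch_char]
  by_cases hv : pvValidateB pairs = true
  · simp only [hv, if_true]
    cases hL : pvShiftsAll pairs with
    | nil => simp [PySem.Set.empty, PySem.Set.len]
    | cons s0 t =>
      have hs0 : 0 ≤ s0 ∧ s0 < 26 := pvShiftsAll_bounds pairs s0 (by rw [hL]; simp)
      have hck := pvCheckAll_char pairs s0 hv hs0
      have hstep : (s0 :: t).foldl PySem.Set.add PySem.Set.empty = t.foldl PySem.Set.add [s0] := by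
        rfl
      by_cases hall : ∀ x ∈ t, x = s0
      · have hall' : ∀ x ∈ pvShiftsAll pairs, x = s0 := by
          rw [hL]; intro x hx
          rcases List.mem_cons.mp hx with h | h
          · exact h
          · exact hall x h
        have hC : pvCheckAll s0 pairs = true := hck.mpr hall'
        rw [hstep, pvFoldl_add_const t s0 hall]
        simp [PySem.Set.len, hC]
      · obtain ⟨x, hxt, hxne⟩ : ∃ x ∈ t, x ≠ s0 := by
          by_contra h
          exact hall (by simpa using h)
        have hC : pvCheckAll s0 pairs = false := by
          rw [Bool.eq_false_iff]
          intro hCt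
          exact hxne (hck.mp hCt x (by rw [hL]; simp [hxt]))
        have hmem0 : s0 ∈ t.foldl PySem.Set.add [s0] :=
          pvMem_foldl_add t [s0] s0 (Or.inl (by simp))
        have hmemx : x ∈ t.foldl PySem.Set.add [s0] :=
          pvMem_foldl_add t [s0] x (Or.inr hxt)
        have hlen2 : (t.foldl PySem.Set.add [s0]).length ≠ 1 := by
          intro h1
          obtain ⟨y, hy⟩ := List.length_eq_one_iff.mp h1
          rw [hy] at hmem0 hmemx
          simp at hmem0 hmemx
          exact hxne (hmemx.trans hmem0.symm)
        rw [hstep]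
        simp [PySem.Set.len, hlen2, hC]
  · simp [hv]
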